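-- pv_equiv track=rewrite | github.com/xiao-en-5970/pcr-gen | pcrv2.py | select_render_frames
-- ===== SOURCE A (Python) =====
-- def select_render_frames(render_frames, operation_count, operation_type):
--     """根据操作类型和数量选择合适的渲染帧"""
--     if not render_frames:
--         return [0] * operation_count
--
--     # 对于UB操作，使用第一个渲染帧3次（减速、UB、加速）
--     if operation_type == 'UB':
--         if len(render_frames) >= 1:
--             return [render_frames[0]] * 3
--         else:
--             return [render_frames[0]] * 3
--
--     # 对于AUTO操作，使用第一个渲染帧3次（AUTO开、AUTO关、其他操作）
--     elif operation_type == 'AUTO':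
--         if len(render_frames) >= 1:
--             return [render_frames[0]] * 3
--         else:
--             return [render_frames[0]] * 3
--
--     # 对于连点操作，根据基准脚本的选择模式
--     else:
--         if len(render_frames) == 1:
--             return [render_frames[0]] * operation_count
--
--         # 基准脚本的选择模式：基于实际观察到的精确模式
--         selected = []
--
--         # 总是选择第一个渲染帧
--         if operation_count > 0:
--             selected.append(render_frames[0])
--
--         # 根据操作数量选择其他渲染帧，基于基准脚本的实际模式
--         if operation_count > 1:
--             # 对于2个操作：选择第1个和第3个渲染帧（间隔2）
--             if len(render_frames) >= 3:
--                 selected.append(render_frames[2])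
--             elif len(render_frames) >= 2:
--                 selected.append(render_frames[1])
--             else:
--                 selected.append(render_frames[0])
--
--         if operation_count > 2:
--             # 对于3个操作：选择第1个、第3个、第4个渲染帧
--             if len(render_frames) >= 4:
--                 selected.append(render_frames[3])
--             elif len(render_frames) >= 3:
--                 selected.append(render_frames[2])
--             else:
--                 selected.append(render_frames[-1])
--
--         if operation_count > 3:
--             # 对于4个操作：选择第1个、第2个、第4个渲染帧
--             if len(render_frames) >= 4:
--                 selected.append(render_frames[3])
--             elif len(render_frames) >= 3:
--                 selected.append(render_frames[2])
--             else:
--                 selected.append(render_frames[-1])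
--
--         if operation_count > 4:
--             # 对于5个操作：选择第1个、第1个、第1个、第2个、第4个渲染帧
--             if len(render_frames) >= 4:
--                 selected.append(render_frames[3])
--             elif len(render_frames) >= 3:
--                 selected.append(render_frames[2])
--             else:
--                 selected.append(render_frames[-1])
--
--         # 如果还需要更多渲染帧，重复使用最后一个
--         while len(selected) < operation_count:
--             selected.append(render_frames[-1])
--
--         return selected[:operation_count]
-- ===== SOURCE B (Python) =====
-- def select_render_frames(render_frames, operation_count, operation_type):
--     """根据操作类型和数量选择合适的渲染帧"""
--     if not render_frames:
--         return [0] * operation_count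
--     if operation_type in ('UB', 'AUTO'):
--         return [render_frames[0]] * 3
--     base = [0, 2, 3, 3, 3]
--     last = len(render_frames) - 1
--     return [render_frames[min(base[i], last) if i < len(base) else last]
--             for i in range(operation_count)]
-- ===== Notes on version B (the rewrite author's own statement) =====
-- stated objective: simpler
-- what changed: The default branch's five cascaded conditional appends, the pad-while loop and the final slice are replacedced by a single table-driven pass: one comprehension over range(operation_count) indexing render_frames at min(base[i], len-1) with base=[0,2,3,3,3] (last element beyond the table), which also absorbs the len==1 special case and merges the duplicated UB/AUTO branches.
import Mathlib
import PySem

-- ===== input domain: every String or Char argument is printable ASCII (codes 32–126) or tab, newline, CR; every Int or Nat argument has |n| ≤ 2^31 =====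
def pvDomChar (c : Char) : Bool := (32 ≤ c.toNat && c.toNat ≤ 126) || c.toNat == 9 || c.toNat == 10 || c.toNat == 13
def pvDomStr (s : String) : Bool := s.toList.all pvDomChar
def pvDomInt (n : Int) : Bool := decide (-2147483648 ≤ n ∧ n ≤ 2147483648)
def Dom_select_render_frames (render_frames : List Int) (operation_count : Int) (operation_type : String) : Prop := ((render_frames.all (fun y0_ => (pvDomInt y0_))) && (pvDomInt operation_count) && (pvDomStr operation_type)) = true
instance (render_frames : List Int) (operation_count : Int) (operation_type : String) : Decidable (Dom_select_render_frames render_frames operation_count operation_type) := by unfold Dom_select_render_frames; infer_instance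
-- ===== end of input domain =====

-- B replaces A's five cascaded conditional appends + pad-while + slice in the default
-- branch by a single table-driven pass (base = [0,2,3,3,3], index clamped to len-1);
-- objective: simpler.

-- ===== PORT A =====
-- the 'while len(selected) < operation_count: selected.append(render_frames[-1])' loop
def pvPadWhile (last : Int) (oc : Int) (sel : List Int) : List Int :=
  if (sel.length : Int) < oc then pvPadWhile last oc (sel ++ [last]) else sel
termination_by (oc - sel.length).toNat
decreasing_by simp [List.length_append]; omega

def select_render_frames (render_frames : List Int) (operation_count : Int) (operation_type : String) : List Int :=
  if render_frames = [] then PySem.List.pyRepeat [0] operation_count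
  else if operation_type = "UB" then
    (if (1:Int) ≤ (render_frames.length : Int) then
      PySem.List.pyRepeat [PySem.List.pyGetD render_frames 0 0] 3
    else
      PySem.List.pyRepeat [PySem.List.pyGetD render_frames 0 0] 3)
  else if operation_type = "AUTO" then
    (if (1:Int) ≤ (render_frames.length : Int) then
      PySem.List.pyRepeat [PySem.List.pyGetD render_frames 0 0] 3
    else
      PySem.List.pyRepeat [PySem.List.pyGetD render_frames 0 0] 3)
  else
    if (render_frames.length : Int) = 1 then
      PySem.List.pyRepeat [PySem.List.pyGetD render_frames 0 0] operation_count
    else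
      let selected : List Int := []
      let selected := if 0 < operation_count then
          selected ++ [PySem.List.pyGetD render_frames 0 0] else selected
      let selected := if 1 < operation_count then
          selected ++ [if (3:Int) ≤ (render_frames.length : Int) then PySem.List.pyGetD render_frames 2 0
                       else if (2:Int) ≤ (render_frames.length : Int) then PySem.List.pyGetD render_frames 1 0
                       else PySem.List.pyGetD render_frames 0 0] else selected
      let selected := if 2 < operation_count then
          selected ++ [if (4:Int) ≤ (render_frames.length : Int) then PySem.List.pyGetD render_frames 3 0
                       else if (3:Int) ≤ (render_frames.length : Int) then PySem.List.pyGetD render_frames 2 0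
                       else PySem.List.pyGetD render_frames (-1) 0] else selected
      let selected := if 3 < operation_count then
          selected ++ [if (4:Int) ≤ (render_frames.length : Int) then PySem.List.pyGetD render_frames 3 0
                       else if (3:Int) ≤ (render_frames.length : Int) then PySem.List.pyGetD render_frames 2 0
                       else PySem.List.pyGetD render_frames (-1) 0] else selected
      let selected := if 4 < operation_count then
          selected ++ [if (4:Int) ≤ (render_frames.length : Int) then PySem.List.pyGetD render_frames 3 0
                       else if (3:Int) ≤ (render_frames.length : Int) then PySem.List.pyGetD render_frames 2 0
                       else PySem.List.pyGetD render_frames (-1) 0] else selected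
      let selected := pvPadWhile (PySem.List.pyGetD render_frames (-1) 0) operation_count selected
      PySem.List.slice selected none (some operation_count)

-- ===== PORT B =====
def select_render_frames_alt (render_frames : List Int) (operation_count : Int) (operation_type : String) : List Int :=
  if render_frames = [] then PySem.List.pyRepeat [0] operation_count
  else if operation_type = "UB" ∨ operation_type = "AUTO" then
    PySem.List.pyRepeat [PySem.List.pyGetD render_frames 0 0] 3
  else
    let base : List Int := [0, 2, 3, 3, 3]
    let last : Int := (render_frames.length : Int) - 1
    (PySem.List.pyRange 0 operation_count 1).map (fun i =>
      PySem.List.pyGetD render_frames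
        (if i < (base.length : Int) then min (PySem.List.pyGetD base i 0) last else last) 0)

-- ===== PRECONDITION & SPEC =====
def Spec_select_render_frames (render_frames : List Int) (operation_count : Int) (operation_type : String) (out : List Int) : Prop := out = select_render_frames_alt render_frames operation_count operation_type
instance (render_frames : List Int) (operation_count : Int) (operation_type : String) (out : List Int) : Decidable (Spec_select_render_frames render_frames operation_count operation_type out) := by unfold Spec_select_render_frames; infer_instance

-- ===== CLAIM (what is proved, stated in full; the proofs are below) =====
def Claim_equal_select_render_frames : Prop := ∀ (render_frames : List Int) (operation_count : Int) (operation_type : String), Dom_select_render_frames render_frames operation_count operation_type → Spec_select_render_frames render_frames operation_count operation_type (select_render_frames render_frames operation_count operation_type)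

-- ===== LEMMAS AND PROOFS =====

lemma pvPadWhile_eq (last oc : Int) (sel : List Int) :
    pvPadWhile last oc sel = sel ++ List.replicate (oc - sel.length).toNat last := by
  generalize hk : (oc - (sel.length : Int)).toNat = k
  induction k generalizing sel with
  | zero =>
    rw [pvPadWhile, if_neg (by omega)]
    simp
  | succ n ih =>
    rw [pvPadWhile, if_pos (by omega)]
    rw [ih (sel ++ [last]) (by simp [List.length_append]; omega)]
    rw [List.replicate_succ]
    simp

lemma pvMapConst {α β : Type} (l : List α) (f : α → β) (c : β) (h : ∀ x ∈ l, f x = c) :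
    l.map f = List.replicate l.length c := by
  induction l with
  | nil => simp
  | cons a t ih =>
    simp only [List.map, List.length_cons, List.replicate_succ, h a (by simp)]
    rw [ih (fun x hx => h x (by simp [hx]))]

lemma pvSliceAll (L : List Int) (oc : Int) (h : (L.length : Int) ≤ oc) (h0 : 0 ≤ oc) :
    PySem.List.slice L none (some oc) = L := by
  rw [PySem.List.slice_to L h0]
  exact List.take_of_length_le (by omega)

theorem select_render_frames_spec : Claim_equal_select_render_frames := by
  intro rf oc ot _
  unfold Spec_select_render_frames select_render_frames select_render_frames_alt
  by_cases hnil : rf = []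
  · simp [hnil]
  · have hlen0 : 0 < rf.length := List.length_pos_iff.mpr hnil
    rw [if_neg hnil, if_neg hnil]
    by_cases hub : ot = "UB"
    · rw [if_pos hub, if_pos (Or.inl hub), if_pos (by omega : (1:Int) ≤ (rf.length:Int))]
    · by_cases hau : ot = "AUTO"
      · rw [if_neg hub, if_pos hau, if_pos (Or.inr hau),
          if_pos (by omega : (1:Int) ≤ (rf.length:Int))]
      · rw [if_neg hub, if_neg hau, if_neg (not_or.mpr ⟨hub, hau⟩)]
        by_cases h1 : (rf.length : Int) = 1
        · rw [if_pos h1]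
          have hmem : ∀ i ∈ PySem.List.pyRange 0 oc 1,
              PySem.List.pyGetD rf
                (if i < ((([0,2,3,3,3] : List Int)).length : Int) then
                  min (PySem.List.pyGetD [0,2,3,3,3] i 0) ((rf.length : Int) - 1)
                 else (rf.length : Int) - 1) 0 = PySem.List.pyGetD rf 0 0 := by
            intro i hi
            have h0i : 0 ≤ i := ((PySem.List.mem_pyRange_one).mp hi).1
            by_cases hi5 : i < 5
            · interval_cases i <;> simp [PySem.List.pyGetD, PySem.List.pyGet?, PySem.List.pyIdx?, h1]
            · simp only [List.length_cons, List.length_nil]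
              rw [if_neg (by push_cast; omega)]
              simp [h1]
          show _ = (PySem.List.pyRange 0 oc 1).map _
          rw [pvMapConst _ _ (PySem.List.pyGetD rf 0 0) hmem,
            PySem.List.length_pyRange_one, PySem.List.pyRepeat_singleton]
          norm_num
        · rw [if_neg h1]
          have h2 : 2 ≤ rf.length := by omega
          have hg1 : PySem.List.pyGetD rf (-1) 0
              = PySem.List.pyGetD rf ((rf.length : Int) - 1) 0 := by
            rw [PySem.List.pyGetD_neg_one rf 0 hnil,
              PySem.List.pyGetD_eq_getElem rf 0 (by omega) (by omega),
              List.getLast_eq_getElem]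
            congr 1
            omega
          have he1 : (if (3:Int) ≤ (rf.length : Int) then PySem.List.pyGetD rf 2 0
                      else if (2:Int) ≤ (rf.length : Int) then PySem.List.pyGetD rf 1 0
                      else PySem.List.pyGetD rf 0 0)
              = PySem.List.pyGetD rf (min 2 ((rf.length : Int) - 1)) 0 := by
            by_cases h3 : (3:Int) ≤ (rf.length : Int)
            · rw [if_pos h3]; congr 1; omega
            · rw [if_neg h3, if_pos (by omega)]; congr 1; omega
          have he2 : (if (4:Int) ≤ (rf.length : Int) then PySem.List.pyGetD rf 3 0
                      else if (3:Int) ≤ (rf.length : Int) then PySem.List.pyGetD rf 2 0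
                      else PySem.List.pyGetD rf (-1) 0)
              = PySem.List.pyGetD rf (min 3 ((rf.length : Int) - 1)) 0 := by
            by_cases h4 : (4:Int) ≤ (rf.length : Int)
            · rw [if_pos h4]; congr 1; omega
            · by_cases h3 : (3:Int) ≤ (rf.length : Int)
              · rw [if_neg h4, if_pos h3]; congr 1; omega
              · rw [if_neg h4, if_neg h3, hg1]; congr 1; omega
          dsimp only
          rw [he1, he2, hg1]
          by_cases hoc0 : oc ≤ 0
          · rw [if_neg (show ¬((0:Int) < oc) by omega), if_neg (show ¬((1:Int) < oc) by omega),
              if_neg (show ¬((2:Int) < oc) by omega), if_neg (show ¬((3:Int) < oc) by omega),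
              if_neg (show ¬((4:Int) < oc) by omega), pvPadWhile_eq,
              PySem.List.pyRange_one_eq_nil (by omega)]
            simp [PySem.List.slice, show oc.toNat = 0 by omega]
          · have hmin0 : min (0:Int) ((rf.length : Int) - 1) = 0 := by omega
            have hb0 : PySem.List.pyGetD ([0,2,3,3,3] : List Int) 0 0 = 0 := by decide
            have hb1 : PySem.List.pyGetD ([0,2,3,3,3] : List Int) 1 0 = 2 := by decide
            have hb2 : PySem.List.pyGetD ([0,2,3,3,3] : List Int) 2 0 = 3 := by decide
            have hb3 : PySem.List.pyGetD ([0,2,3,3,3] : List Int) 3 0 = 3 := by decide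
            have hb4 : PySem.List.pyGetD ([0,2,3,3,3] : List Int) 4 0 = 3 := by decide
            by_cases hoc5 : 5 ≤ oc
            · rw [if_pos (show (0:Int) < oc by omega), if_pos (show (1:Int) < oc by omega),
                if_pos (show (2:Int) < oc by omega), if_pos (show (3:Int) < oc by omega),
                if_pos (show (4:Int) < oc by omega), pvPadWhile_eq,
                PySem.List.pyRange_one_append 0 5 oc (by omega) (by omega), List.map_append,
                show PySem.List.pyRange 0 5 1 = [0,1,2,3,4] from by decide]
              have hconst : ∀ i ∈ PySem.List.pyRange 5 oc 1,
                  PySem.List.pyGetD rf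
                    (if i < ((([0,2,3,3,3] : List Int)).length : Int) then
                      min (PySem.List.pyGetD [0,2,3,3,3] i 0) ((rf.length : Int) - 1)
                     else (rf.length : Int) - 1) 0
                  = PySem.List.pyGetD rf ((rf.length : Int) - 1) 0 := by
                intro i hi
                have h5i : 5 ≤ i := ((PySem.List.mem_pyRange_one).mp hi).1
                rw [if_neg (by simp; omega)]
              rw [pvMapConst _ _ _ hconst, PySem.List.length_pyRange_one,
                pvSliceAll _ _ (by simp only [List.length_append, List.length_cons,
                  List.length_nil, List.length_replicate]; omega) (by omega)]
              simp [hmin0, hb0, hb1, hb2, hb3, hb4]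
            · interval_cases oc <;>
                · norm_num
                  rw [pvPadWhile_eq,
                    pvSliceAll _ _ (by simp only [List.length_append, List.length_cons,
                      List.length_nil, List.length_replicate]; omega) (by omega)]
                  simp [hmin0, hb0, hb1, hb2, hb3, PySem.List.pyRange_one,
                    List.range_succ]
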